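-- pv_equiv track=rewrite | github.com/GustavoNagel/adventofcode2023 | day13/main.py | identify_mirror
-- ===== SOURCE A (Python) =====
-- def identify_mirror(vector_sum: list) -> int:
--     already_visited = []
--     for i, elem in enumerate(vector_sum):
--         if already_visited and elem == already_visited[-1]:
--             size = min(len(vector_sum) - i, i)
--             if already_visited[i-1:i-1-size if i-1-size >=0 else None:-1] == vector_sum[i:i+size]:
--                 return i
--         already_visited.append(elem)
-- ===== SOURCE B (Python) =====
-- def identify_mirror(vector_sum: list) -> int:
--     # Manacher-style even-palindrome radii: reuse the mirrored radius inside the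
--     # rightmost known palindrome [l, r) instead of re-comparing slices per position.
--     n = len(vector_sum)
--     d = [0] * (n + 1)
--     l, r = 0, 0
--     for c in range(1, n):
--         k = 0
--         if c < r:
--             k = min(r - c, d[l + r - c])
--         while k < c and k < n - c and vector_sum[c - 1 - k] == vector_sum[c + k]:
--             k += 1
--         if k >= min(c, n - c):
--             return c
--         d[c] = k
--         if c + k > r:
--             l, r = c - k, c + k
--     return None
-- ===== Notes on version B (the rewrite author's own statement) =====
-- stated objective: alternative
-- what changed: A re-checks a full reversed-slice palindrome at every candidate position; B computes even-palindrome radii Manacher-style, reusing the mirrored radius inside the rightmost known palindrome, and returns the first center whose radius reaches an edge.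
import Mathlib
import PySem

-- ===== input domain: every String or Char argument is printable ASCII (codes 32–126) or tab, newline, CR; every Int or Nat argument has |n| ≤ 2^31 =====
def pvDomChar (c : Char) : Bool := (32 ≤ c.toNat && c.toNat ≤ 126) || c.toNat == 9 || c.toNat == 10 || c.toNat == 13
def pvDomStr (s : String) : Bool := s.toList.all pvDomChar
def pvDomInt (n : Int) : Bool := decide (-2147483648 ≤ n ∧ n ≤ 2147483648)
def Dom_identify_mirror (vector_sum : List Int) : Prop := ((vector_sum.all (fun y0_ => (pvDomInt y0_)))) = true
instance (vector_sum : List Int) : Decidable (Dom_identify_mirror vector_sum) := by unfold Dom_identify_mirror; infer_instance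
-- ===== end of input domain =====

-- B replaces A's per-position reversed-slice comparison by a Manacher-style reuse of
-- already-computed even-palindrome radii (objective: alternative algorithm, same return value).

-- ===== PORT A =====
-- literal port of A: walk enumerate(vector_sum) carrying already_visited;
-- 'already_visited and elem == already_visited[-1]' is the conjunction below
-- (pyGetD at -1 is guarded by visited ≠ [], where Python's [-1] cannot raise);
-- the reversed slice already_visited[i-1 : i-1-size if i-1-size >= 0 else None : -1] is slice?.
def identifyAux (vs : List Int) : List (Int × Int) → List Int → Option Int
  | [], _ => none
  | (i, elem) :: rest, visited =>
    if visited ≠ [] ∧ elem = PySem.List.pyGetD visited (-1) 0 then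
      let size : Int := min (PySem.List.len vs - i) i
      if PySem.List.slice? visited (some (i - 1))
           (if i - 1 - size ≥ 0 then some (i - 1 - size) else none) (-1)
         = some (PySem.List.slice vs (some i) (some (i + size))) then
        some i
      else identifyAux vs rest (visited ++ [elem])
    else identifyAux vs rest (visited ++ [elem])

def identify_mirror (vector_sum : List Int) : Option Int :=
  identifyAux vector_sum (PySem.List.enumerate vector_sum 0) []

-- ===== PORT B =====
-- port of Source B. expandB is the 'while k < c and k < n - c and vector_sum[c-1-k] == vector_sum[c+k]'
-- loop (its guards keep both indices in range, where pyGetD is exact).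
def expandB (vs : List Int) (n c k : Int) : Int :=
  if k < c ∧ k < n - c ∧ PySem.List.pyGetD vs (c - 1 - k) 0 = PySem.List.pyGetD vs (c + k) 0 then
    expandB vs n c (k + 1)
  else k
termination_by (c - k).toNat
decreasing_by omega

-- the 'for c in range(1, n)' loop carrying (d, l, r)
def loopB (vs : List Int) (n : Int) : List Int → List Int × Int × Int → Option Int
  | [], _ => none
  | c :: cs, (d, l, r) =>
    let k0 : Int := if c < r then min (r - c) (PySem.List.pyGetD d (l + r - c) 0) else 0
    let k := expandB vs n c k0
    if min c (n - c) ≤ k then some c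
    else loopB vs n cs (PySem.List.pySetD d c k, if r < c + k then (c - k, c + k) else (l, r))

def identify_mirror_alt (vector_sum : List Int) : Option Int :=
  let n := PySem.List.len vector_sum
  loopB vector_sum n (PySem.List.pyRange 1 n 1) (PySem.List.pyRepeat [0] (n + 1), 0, 0)

-- ===== PRECONDITION & SPEC =====
def Spec_identify_mirror (vector_sum : List Int) (out : Option Int) : Prop := out = identify_mirror_alt vector_sum
instance (vector_sum : List Int) (out : Option Int) : Decidable (Spec_identify_mirror vector_sum out) := by unfold Spec_identify_mirror; infer_instance

-- ===== CLAIM (what is proved, stated in full; the proofs are below) =====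
def Claim_equal_identify_mirror : Prop := ∀ (vector_sum : List Int), Dom_identify_mirror vector_sum → Spec_identify_mirror vector_sum (identify_mirror vector_sum)

-- ===== LEMMAS AND PROOFS =====


def gd (v : List Int) (p : Int) : Int := PySem.List.pyGetD v p 0
def good (v : List Int) (c k : Int) : Prop :=
  ∀ j : Int, 0 ≤ j → j < k → gd v (c - 1 - j) = gd v (c + j)
def goodb (v : List Int) (c k : Int) : Bool :=
  (List.range k.toNat).all (fun j => gd v (c - 1 - (j : Int)) == gd v (c + (j : Int)))

lemma goodb_iff (v : List Int) (c k : Int) : goodb v c k = true ↔ good v c k := by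
  unfold goodb good
  rw [List.all_eq_true]
  constructor
  · intro h j h0 hj
    have := h j.toNat (List.mem_range.mpr (by omega))
    rw [beq_iff_eq] at this
    rwa [Int.toNat_of_nonneg h0] at this
  · intro h j hj
    rw [List.mem_range] at hj
    rw [beq_iff_eq]
    exact h j (by omega) (by omega)

lemma expandB_ge (vs : List Int) (n c k : Int) : k ≤ expandB vs n c k := by
  fun_induction expandB with
  | case1 k h ih => omega
  | case2 k h => omega

lemma expandB_le (vs : List Int) (n c k : Int) (h : k ≤ min c (n - c)) :
    expandB vs n c k ≤ min c (n - c) := by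
  fun_induction expandB with
  | case1 k hg ih => exact ih (by omega)
  | case2 k hg => omega

lemma expandB_good (vs : List Int) (n c k : Int) (h : good vs c k) :
    good vs c (expandB vs n c k) := by
  fun_induction expandB with
  | case1 k hg ih =>
    apply ih
    intro j h0 hj
    by_cases hjk : j < k
    · exact h j h0 hjk
    · have hj : j = k := by omega
      subst hj
      exact hg.2.2
  | case2 k hg => exact h

lemma expandB_eq (vs : List Int) (n c : Int) (k k' : Int) (h0 : 0 ≤ k) (hkk : k ≤ k')
    (hk' : k' ≤ min c (n - c)) (hg : good vs c k') :
    expandB vs n c k = expandB vs n c k' := by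
  by_cases he : k = k'
  · rw [he]
  · have hlt : k < k' := by omega
    have step : expandB vs n c k = expandB vs n c (k + 1) := by
      rw [expandB]
      rw [if_pos ⟨by omega, by omega, hg k h0 hlt⟩]
    rw [step]
    exact expandB_eq vs n c (k + 1) k' (by omega) (by omega) hk' hg
termination_by (k' - k).toNat
decreasing_by omega

def rad (v : List Int) (c : Int) : Int := expandB v (v.length : Int) c 0
lemma rad_nonneg (v : List Int) (c : Int) : 0 ≤ rad v c := expandB_ge v _ c 0
lemma rad_le (v : List Int) (c : Int) (h : 0 ≤ min c ((v.length : Int) - c)) :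
    rad v c ≤ min c ((v.length : Int) - c) := expandB_le v _ c 0 h
lemma rad_good (v : List Int) (c : Int) : good v c (rad v c) :=
  expandB_good v _ c 0 (by intro j h0 hj; omega)

lemma pal_pair {v : List Int} {m k : Int} (hg : good v m k) {p : Int}
    (h1 : m - k ≤ p) (h2 : p < m + k) : gd v p = gd v (2 * m - 1 - p) := by
  by_cases hp : m ≤ p
  · have h := hg (p - m) (by omega) (by omega)
    have e1 : m - 1 - (p - m) = 2 * m - 1 - p := by ring
    have e2 : m + (p - m) = p := by ring
    rw [e1, e2] at h
    exact h.symm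
  · have h := hg (m - 1 - p) (by omega) (by omega)
    have e1 : m - 1 - (m - 1 - p) = p := by ring
    have e2 : m + (m - 1 - p) = 2 * m - 1 - p := by ring
    rw [e1, e2] at h
    exact h

lemma mirror {v : List Int} {m k c : Int} (n : Int) (hn : n = (v.length : Int))
    (_h0 : 0 ≤ k) (hk : k ≤ min m (n - m)) (hg : good v m k)
    (hc : m < c) (hcr : c < m + k) (hcn : c < n) :
    good v c (min (m + k - c) (rad v (2 * m - c))) := by
  intro j hj0 hj
  have hradle : rad v (2 * m - c) ≤ min (2 * m - c) ((v.length : Int) - (2 * m - c)) :=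
    rad_le v _ (by omega)
  have hjr : j < rad v (2 * m - c) := by omega
  have hjc : j < m + k - c := by omega
  have hq := rad_good v (2 * m - c) j hj0 hjr
  have e1 : gd v (c + j) = gd v (2 * m - c - 1 - j) := by
    have h := pal_pair hg (p := c + j) (by omega) (by omega)
    have e : 2 * m - 1 - (c + j) = 2 * m - c - 1 - j := by ring
    rwa [e] at h
  have e2 : gd v (c - 1 - j) = gd v (2 * m - c + j) := by
    have h := pal_pair hg (p := c - 1 - j) (by omega) (by omega)
    have e : 2 * m - 1 - (c - 1 - j) = 2 * m - c + j := by ring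
    rwa [e] at h
  rw [e2, ← hq, ← e1]

lemma rad_full_iff (v : List Int) (c : Int) (h1 : 1 ≤ c) (h2 : c < (v.length : Int)) :
    (min c ((v.length : Int) - c) ≤ rad v c ↔ good v c (min c ((v.length : Int) - c))) := by
  have hm0 : 0 ≤ min c ((v.length : Int) - c) := by omega
  constructor
  · intro h
    have hle := rad_le v c hm0
    have he : rad v c = min c ((v.length : Int) - c) := by omega
    rw [← he]
    exact rad_good v c
  · intro h
    have he : expandB v (v.length : Int) c 0 = expandB v (v.length : Int) c (min c ((v.length : Int) - c)) :=
      expandB_eq v ((v.length : Int)) c 0 (min c ((v.length : Int) - c)) le_rfl hm0 le_rfl h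
    have e2 : expandB v (v.length : Int) c (min c ((v.length : Int) - c)) = min c ((v.length : Int) - c) := by
      rw [expandB, if_neg (by omega)]
    unfold rad
    omega

def scan (v : List Int) (c : Nat) : Option Int :=
  if c < v.length then
    if 0 < c ∧ goodb v (c : Int) (min (c : Int) ((v.length : Int) - c)) then some (c : Int)
    else scan v (c + 1)
  else none
termination_by v.length - c

def InvB (v : List Int) (c : Int) (d : List Int) (l r : Int) : Prop :=
  d.length = v.length + 1 ∧
  (∀ j : Int, 1 ≤ j → j < c → PySem.List.pyGetD d j 0 = rad v j) ∧
  ∃ m k : Int, 0 ≤ m ∧ m < c ∧ 0 ≤ k ∧ k ≤ min m ((v.length : Int) - m) ∧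
    good v m k ∧ l = m - k ∧ r = m + k

lemma B_loop_aux (vs : List Int) (n : Int) (hn : n = (vs.length : Int)) (fuel : Nat) :
    ∀ (c : Nat), vs.length - c = fuel → 1 ≤ c → ∀ (d : List Int) (l r : Int), InvB vs (c : Int) d l r →
    loopB vs n (PySem.List.pyRange (c : Int) n 1) (d, l, r) = scan vs c := by
  induction fuel with
  | zero =>
    intro c hfc hc d l r hinv
    rw [PySem.List.pyRange_one_eq_nil (by omega), loopB, scan, if_neg (by omega)]
  | succ f ih =>
  intro c hfc hc d l r hinv
  by_cases hcn : (c : Int) < n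
  case neg =>
    rw [PySem.List.pyRange_one_eq_nil (by omega), loopB, scan, if_neg (by omega)]
  case pos =>
    rw [PySem.List.pyRange_one_cons hcn, loopB]
    obtain ⟨hd, hdj, m, mk, hm0, hmc, hk0, hkb, hgm, hl, hr⟩ := hinv
    set k0 : Int := if (c : Int) < r then min (r - c) (PySem.List.pyGetD d (l + r - c) 0) else 0 with hk0def
    have hmain : good vs c k0 ∧ 0 ≤ k0 ∧ k0 ≤ min (c : Int) (n - c) := by
      by_cases hcr : (c : Int) < r
      · have hradle : rad vs (2 * m - c) ≤ min (2 * m - c) ((vs.length : Int) - (2 * m - c)) :=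
          rad_le vs _ (by omega)
        have hradge : 0 ≤ rad vs (2 * m - c) := rad_nonneg vs _
        have hd' : PySem.List.pyGetD d (l + r - c) 0 = rad vs (2 * m - c) := by
          have e : l + r - (c : Int) = 2 * m - c := by omega
          rw [e]
          exact hdj _ (by omega) (by omega)
        have hmir := mirror n hn hk0 (by omega) hgm (by omega) (by omega) hcn
        rw [hk0def, if_pos hcr, hd']
        refine ⟨?_, by omega, by omega⟩
        have e : min (r - (c : Int)) (rad vs (2 * m - c)) = min (m + mk - c) (rad vs (2 * m - c)) := by
          omega
        rw [e]
        exact hmir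
      · rw [hk0def, if_neg hcr]
        exact ⟨by intro j hj0 hj; omega, le_rfl, by omega⟩
    obtain ⟨hk0good, hk0nn, hk0le⟩ := hmain
    have hkrad : expandB vs n c k0 = rad vs c := by
      have h1 : expandB vs n c 0 = expandB vs n c k0 :=
        expandB_eq vs n c 0 k0 le_rfl hk0nn hk0le hk0good
      rw [← h1]
      unfold rad
      rw [hn]
    have hkle : expandB vs n c k0 ≤ min (c : Int) (n - c) := expandB_le vs n c k0 hk0le
    have hkge : 0 ≤ expandB vs n c k0 := le_trans hk0nn (expandB_ge vs n c k0)
    have hlen : (PySem.List.pySetD d (c : Int) (expandB vs n (c : Int) k0)).length = vs.length + 1 := by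
      rw [PySem.List.pySetD_of_nonneg d (expandB vs n (c : Int) k0) (by omega), List.length_set]
      exact hd
    have hget : ∀ j : Int, 1 ≤ j → j < (c : Int) + 1 →
        PySem.List.pyGetD (PySem.List.pySetD d (c : Int) (expandB vs n (c : Int) k0)) j 0 = rad vs j := by
      intro j h1 hj
      rw [PySem.List.pySetD_of_nonneg d (expandB vs n (c : Int) k0) (by omega)]
      rw [PySem.List.pyGetD_eq_getElem _ 0 (by omega) (by rw [List.length_set]; omega)]
      rw [List.getElem_set]
      by_cases hjc : j = (c : Int)
      · rw [if_pos (by omega), hjc]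
        exact hkrad
      · rw [if_neg (by omega)]
        rw [← PySem.List.pyGetD_eq_getElem d 0 (by omega) (by omega)]
        exact hdj j h1 (by omega)
    have hclt : c < vs.length := by omega
    by_cases hfull : min (c : Int) (n - c) ≤ expandB vs n c k0
    case pos =>
      have hcondT : 0 < c ∧ goodb vs (c : Int) (min (c : Int) ((vs.length : Int) - (c : Int))) = true := by
        refine ⟨by omega, ?_⟩
        rw [goodb_iff]
        rw [hkrad] at hfull
        exact (rad_full_iff vs c (by omega) (by omega)).mp (by rw [← hn]; exact hfull)
      rw [if_pos hfull, scan, if_pos hclt, if_pos hcondT]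
    case neg =>
      have hcondF : ¬ (0 < c ∧ goodb vs (c : Int) (min (c : Int) ((vs.length : Int) - (c : Int))) = true) := by
        rw [hkrad] at hfull
        intro hb
        apply hfull
        have hgf := (rad_full_iff vs c (by omega) (by omega)).mpr ((goodb_iff vs (c : Int) _).mp hb.2)
        rw [← hn] at hgf
        exact hgf
      rw [if_neg hfull, scan, if_pos hclt, if_neg hcondF]
      have hcast : ((c : Int) + 1) = ((c + 1 : Nat) : Int) := by omega
      by_cases hup : r < (c : Int) + expandB vs n c k0
      · rw [if_pos hup, hcast]
        exact ih (c + 1) (by omega) (by omega) _ _ _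
          ⟨hlen, hget,
           c, expandB vs n c k0, by omega, by push_cast; omega, hkge, by omega,
           expandB_good vs n c k0 hk0good, rfl, rfl⟩
      · rw [if_neg hup, hcast]
        exact ih (c + 1) (by omega) (by omega) _ _ _
          ⟨hlen, hget,
           m, mk, hm0, by push_cast; omega, hk0, hkb, hgm, hl, hr⟩

lemma B_loop (vs : List Int) (n : Int) (hn : n = (vs.length : Int)) (c : Nat)
    (hc : 1 ≤ c) (d : List Int) (l r : Int) (hinv : InvB vs (c : Int) d l r) :
    loopB vs n (PySem.List.pyRange (c : Int) n 1) (d, l, r) = scan vs c :=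
  B_loop_aux vs n hn (vs.length - c) c rfl hc d l r hinv


lemma slice_fwd_eval (v : List Int) (i size : Int) (h0 : 0 ≤ i) (h1 : 0 ≤ size)
    (h2 : i + size ≤ (v.length : Int)) :
    PySem.List.slice v (some i) (some (i + size))
    = (List.range size.toNat).map (fun t : Nat => gd v (i + (t : Int))) := by
  rw [PySem.List.slice_toNat v h0 (by omega)]
  apply List.ext_getElem
  · simp only [List.length_take, List.length_drop, List.length_map, List.length_range]
    omega
  · intro j hj1 hj2
    simp only [List.length_take, List.length_drop] at hj1
    simp only [List.length_map, List.length_range] at hj2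
    simp only [List.getElem_take, List.getElem_drop, List.getElem_map, List.getElem_range]
    rw [gd, PySem.List.pyGetD_eq_getElem v 0 (by omega) (by omega)]
    congr 1
    omega

lemma slice_rev_fm (w : List Int) (size : Int) (h1 : 1 ≤ size) (h2 : size ≤ (w.length : Int)) :
    List.filterMap (fun x : Nat => w[(((w.length : Int) - 1) + -(x : Int)).toNat]?) (List.range size.toNat)
    = List.map (fun t : Nat => gd w ((w.length : Int) - 1 - (t : Int))) (List.range size.toNat) := by
  have hmem : ∀ x ∈ List.range size.toNat,
      w[(((w.length : Int) - 1) + -(x : Int)).toNat]? = some (gd w ((w.length : Int) - 1 - (x : Int))) := by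
    intro x hx
    rw [List.mem_range] at hx
    rw [List.getElem?_eq_getElem (by omega)]
    rw [gd, PySem.List.pyGetD_eq_getElem w 0 (by omega) (by omega)]
    congr 1
  rw [List.filterMap_congr hmem]
  simp

lemma slice_rev_eval (w : List Int) (size : Int) (h1 : 1 ≤ size) (h2 : size ≤ (w.length : Int)) :
    PySem.List.slice? w (some ((w.length : Int) - 1))
      (if (w.length : Int) - 1 - size ≥ 0 then some ((w.length : Int) - 1 - size) else none) (-1)
    = some ((List.range size.toNat).map (fun t : Nat => gd w ((w.length : Int) - 1 - (t : Int)))) := by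
  rw [PySem.List.slice?]
  rw [if_neg (by omega)]
  simp only [PySem.List.sliceIndices]
  norm_num
  have hw : w ≠ [] := by
    intro h
    rw [h] at h2
    simp at h2
    omega
  rw [if_neg hw]
  by_cases hss : size < (w.length : Int)
  · rw [if_pos hss]
    simp only []
    rw [if_neg (show ¬((w.length : Int) - 1 - size < 0) by omega)]
    rw [min_eq_left (by omega)]
    rw [if_pos (show (w.length : Int) - 1 - size < (w.length : Int) - 1 by omega)]
    have hsz : ((w.length : Int) - 1 - ((w.length : Int) - 1 - size)).toNat = size.toNat := by omega
    rw [hsz, slice_rev_fm w size h1 h2]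
  · rw [if_neg hss]
    simp only []
    rw [if_pos (show (-1 : Int) < (w.length : Int) - 1 by omega)]
    have hsz : ((w.length : Int) - 1 - -1).toNat = size.toNat := by omega
    rw [hsz, slice_rev_fm w size h1 h2]

lemma gd_take (vs : List Int) (i : Nat) (p : Int) (h0 : 0 ≤ p) (hp : p < (i : Int))
    (hi : i ≤ vs.length) : gd (vs.take i) p = gd vs p := by
  rw [gd, gd, PySem.List.pyGetD_eq_getElem _ 0 h0 (by simp [List.length_take]; omega),
      PySem.List.pyGetD_eq_getElem vs 0 h0 (by omega)]
  rw [List.getElem_take]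

lemma A_aux_fuel (vs : List Int) (fuel : Nat) : ∀ (i : Nat), vs.length - i = fuel → i ≤ vs.length →
    identifyAux vs (PySem.List.enumerate (vs.drop i) i) (vs.take i) = scan vs i := by
  induction fuel with
  | zero =>
    intro i hf hi
    rw [List.drop_eq_nil_of_le (by omega), PySem.List.enumerate_nil, identifyAux, scan,
        if_neg (by omega)]
  | succ f ih =>
    intro i hf hi
    have hlt : i < vs.length := by omega
    have hdrop : vs.drop i = vs[i] :: vs.drop (i + 1) := List.drop_eq_getElem_cons hlt
    rw [hdrop, PySem.List.enumerate_cons]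
    have htake : vs.take i ++ [vs[i]] = vs.take (i + 1) := by
      rw [List.take_add_one, List.getElem?_eq_getElem hlt]
      rfl
    have hcast : (i : Int) + 1 = ((i + 1 : Nat) : Int) := by omega
    have hih : identifyAux vs (PySem.List.enumerate (vs.drop (i + 1)) ((i : Int) + 1))
        (vs.take i ++ [vs[i]]) = scan vs (i + 1) := by
      rw [htake, hcast]
      exact ih (i + 1) (by omega) (by omega)
    by_cases hz : i = 0
    · subst hz
      rw [identifyAux]
      rw [if_neg (by simp)]
      rw [scan, if_pos hlt, if_neg (by simp)]
      simpa using hih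
    · have hone : 1 ≤ i := by omega
      have htne : vs.take i ≠ [] := by
        intro h
        have hh := congrArg List.length h
        rw [List.length_take, List.length_nil] at hh
        omega
      have hlast : PySem.List.pyGetD (vs.take i) (-1) 0 = vs[i - 1] := by
        rw [PySem.List.pyGetD_neg_one (vs.take i) 0 htne, List.getLast_eq_getElem]
        rw [List.getElem_take]
        congr 1
        simp [List.length_take]
        omega
      rw [identifyAux, hlast]
      simp only [PySem.List.len_eq]
      rw [scan]
      set size : Int := min ((vs.length : Int) - (i : Int)) (i : Int) with hsize
      have hs1 : 1 ≤ size := by omega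
      have hwl : ((vs.take i).length : Int) = (i : Int) := by
        simp [List.length_take]
        omega
      have hrev := slice_rev_eval (vs.take i) size hs1 (by omega)
      rw [hwl] at hrev
      have hfwd := slice_fwd_eval vs i size (by omega) (by omega) (by omega)
      have hkey : (PySem.List.slice? (vs.take i) (some ((i : Int) - 1))
            (if (i : Int) - 1 - size ≥ 0 then some ((i : Int) - 1 - size) else none) (-1)
          = some (PySem.List.slice vs (some (i : Int)) (some ((i : Int) + size))))
          ↔ goodb vs (i : Int) (min (i : Int) ((vs.length : Int) - (i : Int))) = true := by
        rw [hrev, hfwd, Option.some_inj, goodb_iff]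
        have hmin : (min (i : Int) ((vs.length : Int) - (i : Int))) = size := by omega
        rw [hmin]
        constructor
        · intro h j hj0 hjs
          have := congrArg (fun l => l[j.toNat]?) h
          simp only [List.getElem?_map] at this
          rw [List.getElem?_range (by omega)] at this
          simp only [Option.map_some] at this
          rw [Option.some_inj] at this
          rw [gd_take vs i _ (by omega) (by omega) (by omega)] at this
          have e1 : ((j.toNat : Int)) = j := by omega
          rw [e1] at this
          have e2 : (i : Int) - 1 - j = (i : Int) - 1 - j := rfl
          exact this
        · intro h
          apply List.ext_getElem
          · simp
          · intro t ht1 ht2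
            simp only [List.getElem_map, List.getElem_range]
            rw [gd_take vs i _ (by simp at ht1; omega) (by simp at ht1; omega) (by omega)]
            simp only [List.length_map, List.length_range] at ht1
            exact h (t : Int) (by omega) (by omega)
      by_cases hel : vs[i] = vs[i - 1]
      · rw [if_pos ⟨htne, hel⟩]
        by_cases hsl : goodb vs (i : Int) (min (i : Int) ((vs.length : Int) - (i : Int))) = true
        · rw [if_pos (hkey.mpr hsl), if_pos hlt, if_pos ⟨by omega, hsl⟩]
        · rw [if_neg (fun h => hsl (hkey.mp h)), if_pos hlt, if_neg (fun h => hsl h.2)]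
          exact hih
      · rw [if_neg (fun h => hel h.2)]
        rw [if_pos hlt, if_neg ?_]
        · exact hih
        · intro h
          apply hel
          have hg := (goodb_iff _ _ _).mp h.2
          have h0 := hg 0 le_rfl (by omega)
          rw [gd, gd, PySem.List.pyGetD_eq_getElem vs 0 (by omega) (by omega),
              PySem.List.pyGetD_eq_getElem vs 0 (by omega) (by omega)] at h0
          simp only [show ((i : Int) - 1 - 0).toNat = i - 1 by omega,
            show ((i : Int) + 0).toNat = i by omega] at h0
          exact h0.symm

lemma A_aux (vs : List Int) (i : Nat) (hi : i ≤ vs.length) :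
    identifyAux vs (PySem.List.enumerate (vs.drop i) i) (vs.take i) = scan vs i :=
  A_aux_fuel vs (vs.length - i) i rfl hi

lemma A_eq_scan (vs : List Int) : identify_mirror vs = scan vs 0 := by
  have h := A_aux vs 0 (by omega)
  simpa [identify_mirror] using h

lemma B_eq_scan (vs : List Int) : identify_mirror_alt vs = scan vs 0 := by
  unfold identify_mirror_alt
  simp only [PySem.List.len_eq]
  by_cases h : vs.length = 0
  · rw [PySem.List.pyRange_one_eq_nil (by omega), loopB, scan, if_neg (by omega)]
  · have h1 : loopB vs (vs.length : Int) (PySem.List.pyRange ((1 : Nat) : Int) (vs.length : Int) 1)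
        (PySem.List.pyRepeat [0] ((vs.length : Int) + 1), 0, 0) = scan vs 1 := by
      apply B_loop vs _ rfl 1 le_rfl
      refine ⟨?_, ?_, 0, 0, le_rfl, by omega, le_rfl, by omega,
        by intro j h0 hj; omega, rfl, rfl⟩
      · rw [PySem.List.pyRepeat_singleton, List.length_replicate]
        omega
      · intro j h1 hj
        exact absurd hj (by omega)
    have h0 : scan vs 0 = scan vs 1 := by
      rw [scan, if_pos (by omega), if_neg (by simp)]
    push_cast at h1
    exact h1.trans h0.symm

-- ===== VERDICT (by name: the statement is the Claim_ definition above) =====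
theorem identify_mirror_spec : Claim_equal_identify_mirror := by
  intro vs _
  unfold Spec_identify_mirror
  rw [A_eq_scan, B_eq_scan]
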